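-- pv_equiv track=rewrite | github.com/thedoomx/Programming0-1-Python | week7/4_inner_trim.py | inner_trim
-- ===== SOURCE A (Python) =====
-- def inner_trim(string):
--     result = string
--     result = str_reverse(trim(str_reverse(trim(result))))
--     list_of_whitespaces = []
--
--     for index in range(0, len(result)):
--         if result[index] == " ":
--             if result[index + 1] == " ":
--                 list_of_whitespaces += [index + 1]
--
--     final_result = ""
--
--     for index in range(0, len(result)):
--         if index not in list_of_whitespaces:
--             final_result += result[index]
--
--     return final_result
--
-- def str_reverse(word):
--     new_word = ""
--
--     for ch in word:
--         new_word = ch + new_word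
--
--     return new_word
--
-- def trim(string):
--
--     new_word = ""
--
--     index = 0
--
--     for ch in string:
--         if ch == " ":
--             index += 1
--         else:
--             break
--
--     while index < len(string):
--         new_word += string[index]
--
--         index += 1
--
--     return new_word
-- ===== SOURCE B (Python) =====
-- def inner_trim(string):
--     return " ".join(w for w in string.split(" ") if w)
-- ===== Notes on version B (the rewrite author's own statement) =====
-- stated objective: faster
-- what changed: A reverses and left-trims the string twice, collects indices of duplicated inner spaces and rebuilds character by character with a membership scan over that index list; B splits the string on the space character, drops empty tokens and rejoins them with single spaces.
import Mathlib
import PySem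

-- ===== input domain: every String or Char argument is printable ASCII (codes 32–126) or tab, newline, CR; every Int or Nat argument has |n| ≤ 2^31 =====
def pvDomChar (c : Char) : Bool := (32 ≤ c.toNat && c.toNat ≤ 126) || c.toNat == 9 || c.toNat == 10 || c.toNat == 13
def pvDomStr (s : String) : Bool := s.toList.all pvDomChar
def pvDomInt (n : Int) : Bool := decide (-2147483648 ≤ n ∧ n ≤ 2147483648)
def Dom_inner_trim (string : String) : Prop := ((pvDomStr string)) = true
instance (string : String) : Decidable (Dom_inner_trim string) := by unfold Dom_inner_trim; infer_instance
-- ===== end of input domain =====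

-- B replaces A's reverse-trim-twice + duplicate-space index collection + char-by-char rebuild
-- with split-on-space / drop empty tokens / rejoin (idiomatic tokenize-then-join).

-- ===== PORT A =====
-- str_reverse: new_word = ch + new_word over the characters
def pvStrReverse (word : List Char) : List Char :=
  word.foldl (fun new_word ch => ch :: new_word) []

-- first loop of trim: count leading spaces, breaking at the first non-space
def pvTrimIndex : List Char → Nat
  | [] => 0
  | ch :: t => if ch = ' ' then pvTrimIndex t + 1 else 0

-- trim: the while loop appends string[index] for index..len-1 (always in range, default unused)
def pvTrim (s : List Char) : List Char :=
  let index := pvTrimIndex s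
  (PySem.List.pyRange (index : Int) (s.length : Int)).foldl
    (fun new_word i => new_word ++ [PySem.List.pyGetD s i ' ']) []

-- inner_trim: result[index+1] is always in range when Python reads it (after the two trims the
-- last character is never a space), so pyGetD with a non-space default is exact.
def inner_trim (string : String) : String :=
  let result := pvStrReverse (pvTrim (pvStrReverse (pvTrim string.toList)))
  let lows : List Int := (PySem.List.pyRange 0 (result.length : Int)).foldl
    (fun acc i =>
      if PySem.List.pyGetD result i '\x00' = ' ' then
        if PySem.List.pyGetD result (i + 1) '\x00' = ' ' then acc ++ [i + 1] else acc
      else acc) []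
  let fin : List Char := (PySem.List.pyRange 0 (result.length : Int)).foldl
    (fun acc i =>
      if i ∉ lows then acc ++ [PySem.List.pyGetD result i '\x00'] else acc) []
  String.ofList fin

-- ===== PORT B =====
def inner_trim_alt (string : String) : String :=
  String.ofList (List.intercalate [' ']
    ((string.toList.splitOn ' ').filter (fun w => !w.isEmpty)))

-- ===== PRECONDITION & SPEC =====
def Spec_inner_trim (string : String) (out : String) : Prop := out = inner_trim_alt string
instance (string : String) (out : String) : Decidable (Spec_inner_trim string out) := by unfold Spec_inner_trim; infer_instance

-- ===== CLAIM (what is proved, stated in full; the proofs are below) =====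
def Claim_equal_inner_trim : Prop := ∀ (string : String), Dom_inner_trim string → Spec_inner_trim string (inner_trim string)

-- ===== LEMMAS AND PROOFS =====

-- canonical collapse with a "previous character" parameter
def pvCollapse (p : Char) : List Char → List Char
  | [] => []
  | c :: t => if p = ' ' ∧ c = ' ' then pvCollapse c t else c :: pvCollapse c t

def pvLtrim (l : List Char) : List Char := l.dropWhile (· == ' ')
def pvRtrim (l : List Char) : List Char := (l.reverse.dropWhile (· == ' ')).reverse

-- word-context value of B's pipeline: head of the split continues the current word
def pvGexp (t : List Char) : List Char :=
  match t.splitOn ' ' with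
  | [] => []
  | h :: tl => h ++ (tl.filter (fun w => !w.isEmpty)).flatMap (fun w => ' ' :: w)

lemma pvStrReverse_aux (l : List Char) : ∀ acc, l.foldl (fun a c => c :: a) acc = l.reverse ++ acc := by
  induction l with
  | nil => simp
  | cons c t ih => intro acc; simp [List.foldl_cons, ih]

lemma pvLtrim_cons_space (t : List Char) : pvLtrim (' ' :: t) = pvLtrim t := by
  simp [pvLtrim, List.dropWhile_cons]

lemma pvLtrim_cons_ne (c : Char) (t : List Char) (hc : c ≠ ' ') : pvLtrim (c :: t) = c :: t := by
  simp [pvLtrim, List.dropWhile_cons, hc]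

lemma pvRtrim_cons (c : Char) (t : List Char) :
    pvRtrim (c :: t) = if pvRtrim t = [] then (if c = ' ' then [] else [c]) else c :: pvRtrim t := by
  unfold pvRtrim
  rw [List.reverse_cons, List.dropWhile_append]
  by_cases h : (t.reverse.dropWhile (· == ' ')) = []
  · by_cases hc : c = ' ' <;> simp [h, hc, List.dropWhile_cons]
  · simp [h, List.isEmpty_iff]

lemma pvRtrim_eq_nil_iff (l : List Char) : pvRtrim l = [] ↔ ∀ x ∈ l, x = ' ' := by
  unfold pvRtrim
  simp [List.dropWhile_eq_nil_iff]

lemma pvCollapse_congr (p q : Char) (hp : p ≠ ' ') (hq : q ≠ ' ') (l : List Char) :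
    pvCollapse p l = pvCollapse q l := by
  cases l with
  | nil => rfl
  | cons c t => simp [pvCollapse, hp, hq]

lemma pvCollapse_space (l : List Char) : pvCollapse ' ' l = pvCollapse '\x00' (pvLtrim l) := by
  induction l with
  | nil => rfl
  | cons c t ih =>
    by_cases hc : c = ' '
    · subst hc; rw [pvLtrim_cons_space, ← ih]; simp [pvCollapse]
    · rw [pvLtrim_cons_ne c t hc]; simp [pvCollapse, hc]

lemma pvTrims_comm (l : List Char) : pvLtrim (pvRtrim l) = pvRtrim (pvLtrim l) := by
  induction l with
  | nil => rfl
  | cons c t ih =>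
    by_cases hc : c = ' '
    · subst hc
      rw [pvRtrim_cons, pvLtrim_cons_space]
      by_cases h : pvRtrim t = []
      · simp only [h, if_pos, if_true]
        have : List.dropWhile (fun x => x == ' ') t = [] :=
          List.dropWhile_eq_nil_iff.2 (fun x hx => by simp [(pvRtrim_eq_nil_iff t).1 h x hx])
        show pvLtrim [] = pvRtrim (pvLtrim t)
        unfold pvLtrim
        rw [this]
        rw [show pvRtrim ([] : List Char) = [] from rfl]
        rfl
      · simp [h, pvLtrim_cons_space]
        exact ih
    · rw [pvLtrim_cons_ne c t hc, pvRtrim_cons]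
      by_cases h : pvRtrim t = []
      · simp [h, hc]
        exact pvLtrim_cons_ne c [] hc
      · simp [h, hc]
        exact pvLtrim_cons_ne _ _ hc

lemma pvMapRange_drop (s : List Char) : ∀ i : Nat, i ≤ s.length →
    (PySem.List.pyRange (i : Int) (s.length : Int)).map (fun j => PySem.List.pyGetD s j ' ') = s.drop i := by
  intro i hi
  induction hd : s.length - i generalizing i with
  | zero =>
    have : i = s.length := by omega
    subst this
    rw [PySem.List.pyRange_one_eq_nil (by omega)]
    simp
  | succ n ih =>
    rw [PySem.List.pyRange_one_cons (by exact_mod_cast by omega)]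
    have hlt : i < s.length := by omega
    rw [List.map_cons]
    rw [show ((i : Int) + 1) = ((i + 1 : Nat) : Int) by push_cast; ring]
    rw [ih (i+1) (by omega) (by omega)]
    rw [PySem.List.pyGetD_natCast]
    rw [List.drop_eq_getElem_cons hlt]
    simp [List.getD, hlt]

lemma pvTrimIndex_le (s : List Char) : pvTrimIndex s ≤ s.length := by
  induction s with
  | nil => simp [pvTrimIndex]
  | cons c t ih => by_cases hc : c = ' ' <;> simp [pvTrimIndex, hc] <;> omega

lemma pvDrop_trimIndex (s : List Char) : s.drop (pvTrimIndex s) = pvLtrim s := by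
  induction s with
  | nil => rfl
  | cons c t ih =>
    by_cases hc : c = ' '
    · subst hc; simp [pvTrimIndex, pvLtrim, List.dropWhile_cons] at *; exact ih
    · simp [pvTrimIndex, pvLtrim, List.dropWhile_cons, hc]

lemma pvTrim_eq (s : List Char) : pvTrim s = pvLtrim s := by
  unfold pvTrim
  rw [show (List.foldl (fun new_word i => new_word ++ [PySem.List.pyGetD s i ' '])
        [] (PySem.List.pyRange (pvTrimIndex s : Int) (s.length : Int))) =
      [] ++ (PySem.List.pyRange (pvTrimIndex s : Int) (s.length : Int)).map (fun j => PySem.List.pyGetD s j ' ')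
    from PySem.List.foldl_append_singleton_eq_map _ _ _]
  rw [pvMapRange_drop s _ (pvTrimIndex_le s)]
  simp [pvDrop_trimIndex]

lemma pvIntercalate_cons (x : List Char) (xs : List (List Char)) :
    List.intercalate [' '] (x :: xs) = x ++ xs.flatMap (fun w => ' ' :: w) := by
  induction xs generalizing x with
  | nil => simp [List.intercalate]
  | cons y ys ih =>
    rw [List.intercalate, List.intersperse_cons₂, List.flatten_cons, List.flatten_cons]
    have h := ih y
    rw [List.intercalate] at h
    rw [h]
    simp

lemma pvFinG (l : List Char) (p : Char) :
    ((List.range l.length).filter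
        (fun k => !decide ((if k = 0 then p else l.getD (k - 1) '\x00') = ' ' ∧ l.getD k '\x00' = ' '))).map
      (fun k => l.getD k '\x00') = pvCollapse p l := by
  induction l generalizing p with
  | nil => simp [pvCollapse]
  | cons c t ih =>
    rw [List.length_cons, List.range_succ_eq_map, List.filter_cons, List.filter_map]
    have hcomp : ((fun k => !decide ((if k = 0 then p else (c :: t).getD (k - 1) '\x00') = ' ' ∧ (c :: t).getD k '\x00' = ' ')) ∘ Nat.succ)
        = (fun k => !decide ((if k = 0 then c else t.getD (k - 1) '\x00') = ' ' ∧ t.getD k '\x00' = ' ')) := by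
      funext k
      cases k with
      | zero => simp
      | succ m => simp; rfl
    have hmap : ∀ F, List.map (fun k => (c :: t).getD k '\x00') (List.map Nat.succ F) = List.map (fun k => t.getD k '\x00') F := by
      intro F; rw [List.map_map]; apply List.map_congr_left; intro k _; simp
    rw [hcomp]
    by_cases hpc : p = ' ' ∧ c = ' '
    · have : (!decide ((if 0 = 0 then p else (c :: t).getD (0 - 1) '\x00') = ' ' ∧ (c :: t).getD 0 '\x00' = ' ')) = false := by
        simp [hpc.1, hpc.2]
      rw [this]
      simp only [Bool.false_eq_true, if_neg, ite_false, reduceIte]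
      rw [hmap, ih c, pvCollapse]
      simp [hpc.1, hpc.2]
    · have : (!decide ((if 0 = 0 then p else (c :: t).getD (0 - 1) '\x00') = ' ' ∧ (c :: t).getD 0 '\x00' = ' ')) = true := by
        simp only [reduceIte, List.getD_cons_zero, Bool.not_eq_true', decide_eq_false_iff_not]
        exact hpc
      rw [this]
      simp only [if_pos, reduceIte, List.map_cons, List.getD_cons_zero]
      rw [hmap, ih c, pvCollapse, if_neg hpc]

lemma pvLowsFin (l : List Char) (lows : List Int)
    (hlows0 : lows = (PySem.List.pyRange 0 (l.length : Int)).foldl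
        (fun acc i =>
          if PySem.List.pyGetD l i '\x00' = ' ' then
            if PySem.List.pyGetD l (i + 1) '\x00' = ' ' then acc ++ [i + 1] else acc
          else acc) []) :
    (PySem.List.pyRange 0 (l.length : Int)).foldl
        (fun acc i =>
          if i ∉ lows then acc ++ [PySem.List.pyGetD l i '\x00'] else acc) [] =
    pvCollapse '\x00' l := by
  have hbody : (fun (acc : List Int) (i : Int) =>
        if PySem.List.pyGetD l i '\x00' = ' ' then
          if PySem.List.pyGetD l (i + 1) '\x00' = ' ' then acc ++ [i + 1] else acc
        else acc) =
      (fun acc i =>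
        if PySem.List.pyGetD l i '\x00' = ' ' ∧ PySem.List.pyGetD l (i + 1) '\x00' = ' '
          then acc ++ [i + 1] else acc) := by
    funext acc i
    by_cases h1 : PySem.List.pyGetD l i '\x00' = ' ' <;>
      by_cases h2 : PySem.List.pyGetD l (i + 1) '\x00' = ' ' <;> simp [h1, h2]
  have hlows : lows = ((PySem.List.pyRange 0 (l.length : Int)).filter
      (fun i => decide (PySem.List.pyGetD l i '\x00' = ' ' ∧ PySem.List.pyGetD l (i + 1) '\x00' = ' '))).map
        (fun i => i + 1) := by
    rw [hlows0, hbody, PySem.List.foldl_append_ite, List.nil_append]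
  have hmem : ∀ k ∈ List.range l.length, (decide (¬ (k : Int) ∈ lows)) =
      (!decide ((if k = 0 then '\x00' else l.getD (k - 1) '\x00') = ' ' ∧ l.getD k '\x00' = ' ')) := by
    intro k hk
    rw [List.mem_range] at hk
    have hchar : ((k : Int) ∈ lows) ↔ (∃ i : Int, ((0 ≤ i ∧ i < (l.length : Int)) ∧
        (PySem.List.pyGetD l i '\x00' = ' ' ∧ PySem.List.pyGetD l (i + 1) '\x00' = ' ')) ∧ i + 1 = (k : Int)) := by
      rw [hlows]
      simp only [List.mem_map, List.mem_filter, PySem.List.mem_pyRange_one, decide_eq_true_eq]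
    rcases Nat.eq_zero_or_pos k with h0 | h1
    · subst h0
      have hno : ¬ ((0 : Nat) : Int) ∈ lows := by
        rw [hchar]
        rintro ⟨i, ⟨⟨hi0, _⟩, _⟩, hieq⟩
        omega
      have hno' : (0 : Int) ∉ lows := by exact_mod_cast hno
      have h00 : ('\x00' = ' ') = False := by simp
      simp [hno', h00]
    · have hiff : ((k : Int) ∈ lows) ↔
          (l.getD (k - 1) '\x00' = ' ' ∧ l.getD k '\x00' = ' ') := by
        rw [hchar]
        constructor
        · rintro ⟨i, ⟨⟨hi0, hilen⟩, hp1, hp2⟩, hieq⟩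
          have hik : i = ((k - 1 : Nat) : Int) := by push_cast; omega
          subst hik
          rw [PySem.List.pyGetD_natCast] at hp1
          rw [show (((k - 1 : Nat) : Int) + 1) = ((k : Nat) : Int) by omega,
            PySem.List.pyGetD_natCast] at hp2
          exact ⟨hp1, hp2⟩
        · rintro ⟨h1', h2'⟩
          refine ⟨((k - 1 : Nat) : Int), ⟨⟨by positivity, by push_cast; omega⟩, ?_, ?_⟩, by push_cast; omega⟩
          · rw [PySem.List.pyGetD_natCast]; exact h1'
          · rw [show (((k - 1 : Nat) : Int) + 1) = ((k : Nat) : Int) by omega,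
              PySem.List.pyGetD_natCast]
            exact h2'
      rw [if_neg (by omega)]
      by_cases hc : l.getD (k - 1) '\x00' = ' ' ∧ l.getD k '\x00' = ' ' <;> simp [hiff, hc]
  rw [PySem.List.foldl_append_ite (p := fun i => i ∉ lows)
      (f := fun i => PySem.List.pyGetD l i '\x00'),
    PySem.List.pyRange_zero_natCast, List.filter_map, List.map_map, List.nil_append]
  rw [← pvFinG l '\x00']
  rw [show ((fun i => PySem.List.pyGetD l i '\x00') ∘ (fun k : Nat => (k : Int))) = (fun k : Nat => l.getD k '\x00') from
    funext fun k => PySem.List.pyGetD_natCast l k '\x00']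
  congr 1
  apply List.filter_congr
  intro k hk
  simp only [Function.comp]
  exact hmem k hk

lemma pvSplitOn_nil : ([] : List Char).splitOn ' ' = [[]] := rfl

lemma pvSplitOn_cons_space (t : List Char) : (' ' :: t).splitOn ' ' = [] :: t.splitOn ' ' := by
  show List.splitOnP _ _ = _
  rw [List.splitOnP_cons]
  simp
  rfl

lemma pvSplitOn_cons_ne (c : Char) (t : List Char) (hc : c ≠ ' ') :
    (c :: t).splitOn ' ' = (t.splitOn ' ').modifyHead (c :: ·) := by
  show List.splitOnP _ _ = _
  rw [List.splitOnP_cons]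
  simp [hc]
  rfl

lemma pvW_nil_iff (t : List Char) :
    (t.splitOn ' ').filter (fun w => !w.isEmpty) = [] ↔ ∀ x ∈ t, x = ' ' := by
  rw [List.filter_eq_nil_iff]
  constructor
  · intro h
    have hall : ∀ w ∈ t.splitOn ' ', w = [] := by
      intro w hw
      have := h w hw
      simpa [List.isEmpty_iff] using this
    have hrep : ∀ ws : List (List Char), (∀ w ∈ ws, w = []) →
        ∀ x ∈ List.intercalate [' '] ws, x = ' ' := by
      intro ws
      induction ws with
      | nil => intro _ x hx; simp [List.intercalate] at hx
      | cons y ys ih =>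
        intro hall' x hx
        rw [pvIntercalate_cons] at hx
        rw [hall' y (by simp)] at hx
        simp only [List.nil_append, List.mem_flatMap, List.mem_cons] at hx
        obtain ⟨w, hw, hxw⟩ := hx
        rcases hxw with h | h
        · exact h
        · rw [hall' w (by simp [hw])] at h
          simp at h
    intro x hx
    exact hrep _ hall x (by rw [List.intercalate_splitOn t ' ']; exact hx)
  · intro h w hw
    suffices hs : w = [] by simp [hs]
    induction t generalizing w with
    | nil => rw [pvSplitOn_nil] at hw; simpa using hw
    | cons c u ih =>
      have hc : c = ' ' := h c (by simp)
      subst hc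
      rw [pvSplitOn_cons_space] at hw
      rcases List.mem_cons.1 hw with h' | h'
      · exact h'
      · exact ih (fun x hx => h x (by simp [hx])) w h'

lemma pvFlatMap_words (ws : List (List Char)) :
    ws.flatMap (fun w => ' ' :: w) = if ws = [] then [] else ' ' :: List.intercalate [' '] ws := by
  cases ws with
  | nil => simp
  | cons x xs => simp [pvIntercalate_cons]

lemma pvMainAux : ∀ (n : Nat) (t : List Char), t.length ≤ n →
    (List.intercalate [' '] ((t.splitOn ' ').filter (fun w => !w.isEmpty)) =
        pvCollapse '\x00' (pvRtrim (pvLtrim t)) ∧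
      pvGexp t = pvCollapse '\x00' (pvRtrim t)) := by
  intro n
  induction n with
  | zero =>
    intro t ht
    have : t = [] := by cases t <;> simp_all
    subst this
    constructor
    · simp [List.intercalate]
      rfl
    · rfl
  | succ n ih =>
    intro t ht
    cases t with
    | nil =>
      constructor
      · simp [List.intercalate]; rfl
      · rfl
    | cons c t' =>
      have ht' : t'.length ≤ n := by simpa using ht
      obtain ⟨ih1, ih2⟩ := ih t' ht'
      by_cases hc : c = ' '
      · subst hc
        have hGe : pvGexp (' ' :: t') =
            ((t'.splitOn ' ').filter (fun w => !w.isEmpty)).flatMap (fun w => ' ' :: w) := by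
          unfold pvGexp
          rw [pvSplitOn_cons_space]
          simp
        constructor
        · -- component 1, space head
          rw [pvSplitOn_cons_space, pvLtrim_cons_space]
          rw [show ([] :: t'.splitOn ' ').filter (fun w => !w.isEmpty) =
            (t'.splitOn ' ').filter (fun w => !w.isEmpty) by simp]
          exact ih1
        · -- component 2, space head
          rw [hGe, pvFlatMap_words, pvRtrim_cons]
          by_cases h : pvRtrim t' = []
          · rw [if_pos h]
            have : (t'.splitOn ' ').filter (fun w => !w.isEmpty) = [] :=
              (pvW_nil_iff t').2 ((pvRtrim_eq_nil_iff t').1 h)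
            rw [if_pos this]
            rfl
          · rw [if_neg h]
            have hW : ¬ ((t'.splitOn ' ').filter (fun w => !w.isEmpty) = []) := by
              intro hW0
              exact h ((pvRtrim_eq_nil_iff t').2 ((pvW_nil_iff t').1 hW0))
            rw [if_neg hW]
            rw [show pvCollapse '\x00' (' ' :: pvRtrim t') = ' ' :: pvCollapse ' ' (pvRtrim t') by
              rw [pvCollapse]; simp]
            rw [pvCollapse_space, pvTrims_comm, ← ih1]
      · -- non-space head
        obtain ⟨h, tl, hsplit⟩ : ∃ h tl, t'.splitOn ' ' = h :: tl := by
          cases hs : t'.splitOn ' ' with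
          | nil => exact absurd hs (List.splitOnP_ne_nil _ _)
          | cons a b => exact ⟨a, b, rfl⟩
        have hsplit2 : (c :: t').splitOn ' ' = (c :: h) :: tl := by
          rw [pvSplitOn_cons_ne c t' hc, hsplit]
          rfl
        have hrt : pvRtrim (c :: t') = c :: pvRtrim t' := by
          rw [pvRtrim_cons]
          by_cases hr : pvRtrim t' = []
          · rw [if_pos hr, if_neg hc, hr]
          · rw [if_neg hr]
        have hGe2 : pvGexp (c :: t') = c :: pvGexp t' := by
          unfold pvGexp
          rw [hsplit2, hsplit]
          simp
        have hcol : pvCollapse '\x00' (c :: pvRtrim t') = c :: pvCollapse '\x00' (pvRtrim t') := by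
          rw [pvCollapse]
          rw [if_neg (by simp [hc])]
          by_cases hcs : pvRtrim t' = []
          · rw [hcs]; rfl
          · congr 1
            by_cases hcc : c = ' '
            · exact absurd hcc hc
            · exact pvCollapse_congr c '\x00' hc (by decide) _
        constructor
        · rw [pvLtrim_cons_ne c t' hc, hsplit2]
          rw [show ((c :: h) :: tl).filter (fun w => !w.isEmpty) =
            (c :: h) :: tl.filter (fun w => !w.isEmpty) by simp]
          rw [pvIntercalate_cons, hrt, hcol, ← ih2]
          unfold pvGexp
          rw [hsplit]
          simp
        · rw [hGe2, hrt, hcol, ih2]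

lemma pvStrReverse_eq (l : List Char) : pvStrReverse l = l.reverse := by
  unfold pvStrReverse
  rw [pvStrReverse_aux]
  simp

-- A's reverse/trim pipeline followed by the two index loops computes the collapse of the
-- trimmed character list
lemma pvA_eq (s : String) :
    inner_trim s = String.ofList (pvCollapse '\x00' (pvRtrim (pvLtrim s.toList))) := by
  unfold inner_trim
  simp only [pvStrReverse_eq, pvTrim_eq]
  rw [show (pvLtrim ((pvLtrim s.toList).reverse)).reverse = pvRtrim (pvLtrim s.toList) from rfl]
  exact congrArg String.ofList (pvLowsFin _ _ rfl)

-- ===== VERDICT (by name: the statement is the Claim_ definition above) =====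
theorem inner_trim_spec : Claim_equal_inner_trim := by
  intro s _
  unfold Spec_inner_trim inner_trim_alt
  rw [pvA_eq]
  rw [(pvMainAux s.toList.length s.toList le_rfl).1]
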